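-- pv_equiv track=rewrite | github.com/diyakansal/IngestionAPIsystem | app/utils.py | get_ingestion_status
-- ===== SOURCE A (Python) =====
-- def get_ingestion_status(ingestion_id, data):
--     statuses = [batch['status'] for batch in data['batches']]
--     if all(s == "yet_to_start" for s in statuses):
--         return "yet_to_start"
--     elif all(s == "completed" for s in statuses):
--         return "completed"
--     else:
--         return "triggered"
-- ===== SOURCE B (Python) =====
-- def get_ingestion_status(ingestion_id, data):
--     # Single left-to-right pass: normalize each batch status to one of the
--     # three report values, then merge pairwise (equal -> keep, unequal ->
--     # "triggered"); empty batch list reports "yet_to_start".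
--     status = None
--     for batch in data['batches']:
--         s = batch['status']
--         if s != "yet_to_start" and s != "completed":
--             s = "triggered"
--         if status is None:
--             status = s
--         elif status != s:
--             status = "triggered"
--     return status if status is not None else "yet_to_start"
-- ===== Notes on version B (the rewrite author's own statement) =====
-- stated objective: alternative
-- what changed: B makes a single pass with an accumulator, normalizing each status to one of the three report values and merging pairwise (equal keeps, unequal collapses to 'triggered'), instead of A's two staged all() scans over a materialized status list.
import Mathlib
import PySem

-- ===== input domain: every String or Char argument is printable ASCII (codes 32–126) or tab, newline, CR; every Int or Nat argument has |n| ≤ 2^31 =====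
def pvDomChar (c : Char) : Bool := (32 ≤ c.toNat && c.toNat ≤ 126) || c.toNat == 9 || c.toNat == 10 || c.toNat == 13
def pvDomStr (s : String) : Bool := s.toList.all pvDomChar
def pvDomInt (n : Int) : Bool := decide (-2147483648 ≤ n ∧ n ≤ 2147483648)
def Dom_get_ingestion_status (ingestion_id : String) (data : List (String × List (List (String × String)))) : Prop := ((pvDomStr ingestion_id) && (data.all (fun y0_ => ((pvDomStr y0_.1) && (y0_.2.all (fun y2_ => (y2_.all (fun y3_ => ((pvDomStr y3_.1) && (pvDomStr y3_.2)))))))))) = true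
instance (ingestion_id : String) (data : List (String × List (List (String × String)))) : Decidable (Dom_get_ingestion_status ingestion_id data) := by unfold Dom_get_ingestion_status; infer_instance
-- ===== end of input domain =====

-- B is a single-pass normalize-and-merge fold over the batches instead of A's two staged all() scans (alternative structure, same cost).


-- ===== PORT A =====
-- statuses = [batch['status'] for batch in data['batches']]; Pre_ guarantees both dict lookups succeed, so the total getD form is exact there
def get_ingestion_status (ingestion_id : String) (data : List (String × List (List (String × String)))) : String :=
  let batches := ((PySem.Dict.mk data).get? "batches").getD []
  let statuses := batches.map (fun batch => ((PySem.Dict.mk batch).get? "status").getD "")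
  if statuses.all (fun s => s == "yet_to_start") then "yet_to_start"
  else if statuses.all (fun s => s == "completed") then "completed"
  else "triggered"

-- ===== PORT B =====
-- Source B's loop: fold over the batches with an Option String accumulator
def get_ingestion_status_alt (ingestion_id : String) (data : List (String × List (List (String × String)))) : String :=
  let batches := ((PySem.Dict.mk data).get? "batches").getD []
  let st := batches.foldl
    (fun (st : Option String) batch =>
      let s0 := ((PySem.Dict.mk batch).get? "status").getD ""
      let s := if s0 != "yet_to_start" && s0 != "completed" then "triggered" else s0
      match st with
      | none => some s
      | some t => if t != s then some "triggered" else some t)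
    none
  match st with
  | some t => t
  | none => "yet_to_start"

-- ===== PRECONDITION & SPEC =====
-- Pre_: A raises KeyError unless data has a "batches" key and every batch dict has a "status" key.
def Pre_get_ingestion_status (ingestion_id : String) (data : List (String × List (List (String × String)))) : Prop :=
  (((PySem.Dict.mk data).get? "batches").any (fun bs => bs.all (fun b => (PySem.Dict.mk b).contains "status"))) = true
instance (ingestion_id : String) (data : List (String × List (List (String × String)))) : Decidable (Pre_get_ingestion_status ingestion_id data) := by unfold Pre_get_ingestion_status; infer_instance
def pvWitness_get_ingestion_status : String × (List (String × List (List (String × String)))) :=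
  ("abc", [("batches", [[("status", "completed")], [("status", "yet_to_start")]])])
def Spec_get_ingestion_status (ingestion_id : String) (data : List (String × List (List (String × String)))) (out : String) : Prop := out = get_ingestion_status_alt ingestion_id data
instance (ingestion_id : String) (data : List (String × List (List (String × String)))) (out : String) : Decidable (Spec_get_ingestion_status ingestion_id data out) := by unfold Spec_get_ingestion_status; infer_instance

-- ===== CLAIM (what is proved, stated in full; the proofs are below) =====
def Claim_equal_get_ingestion_status : Prop := ∀ (ingestion_id : String) (data : List (String × List (List (String × String)))), Dom_get_ingestion_status ingestion_id data → Pre_get_ingestion_status ingestion_id data → Spec_get_ingestion_status ingestion_id data (get_ingestion_status ingestion_id data)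

-- ===== LEMMAS AND PROOFS =====

-- the status lookup shared by both ports
def pvGetStatus (batch : List (String × String)) : String :=
  ((PySem.Dict.mk batch).get? "status").getD ""

-- normalization of one status, as in Source B's loop body
def pvNorm (s : String) : String :=
  if s != "yet_to_start" && s != "completed" then "triggered" else s

-- once the accumulator is `some t`, B's fold is a plain fold with the merge over normalized statuses
theorem foldl_step_some (l : List (List (String × String))) (t : String) :
    l.foldl
      (fun (st : Option String) batch =>
        match st with
        | none => some (pvNorm (pvGetStatus batch))
        | some u => if u != pvNorm (pvGetStatus batch) then some "triggered" else some u)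
      (some t)
    = some ((l.map (fun b => pvNorm (pvGetStatus b))).foldl
        (fun u s => if u != s then "triggered" else u) t) := by
  induction l generalizing t with
  | nil => rfl
  | cons b bs ih =>
    simp only [List.foldl, List.map]
    by_cases h : (t != pvNorm (pvGetStatus b)) = true
    · rw [if_pos h, if_pos h, ih]
    · rw [if_neg h, if_neg h, ih]

-- the merge fold keeps t iff every element equals t, otherwise yields "triggered"
theorem foldl_merge (l : List String) (t : String) :
    l.foldl (fun u s => if u != s then "triggered" else u) t
    = if l.all (fun s => s == t) then t else "triggered" := by
  induction l generalizing t with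
  | nil => simp
  | cons x xs ih =>
    simp only [List.foldl, List.all_cons]
    by_cases hx : x = t
    · subst hx
      rw [if_neg (by simp), ih]
      simp
    · rw [if_pos (by simp [bne_iff_ne]; exact Ne.symm hx), ih]
      have hxt : (x == t) = false := by simp [hx]
      simp [hxt, ite_self]

theorem pvNorm_eq_yts (s : String) : (pvNorm s == "yet_to_start") = (s == "yet_to_start") := by
  unfold pvNorm; split
  · next h =>
    simp only [Bool.and_eq_true, bne_iff_ne, ne_eq] at h
    simp [h.1]
  · rfl

theorem pvNorm_eq_cpl (s : String) : (pvNorm s == "completed") = (s == "completed") := by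
  unfold pvNorm; split
  · next h =>
    simp only [Bool.and_eq_true, bne_iff_ne, ne_eq] at h
    simp [h.2]
  · rfl

-- the heart of the equivalence, stated over the batch list
theorem pv_core (l : List (List (String × String))) :
    (if (l.map pvGetStatus).all (fun s => s == "yet_to_start") then "yet_to_start"
     else if (l.map pvGetStatus).all (fun s => s == "completed") then "completed"
     else "triggered")
    = (match l.foldl
        (fun (st : Option String) batch =>
          match st with
          | none => some (pvNorm (pvGetStatus batch))
          | some u => if u != pvNorm (pvGetStatus batch) then some "triggered" else some u)
        none with
       | some t => t
       | none => "yet_to_start") := by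
  cases l with
  | nil => simp
  | cons b bs =>
    simp only [List.foldl, foldl_step_some, foldl_merge, List.map_cons, List.all_cons]
    by_cases h1 : ((pvGetStatus b == "yet_to_start") && (bs.map pvGetStatus).all (fun s => s == "yet_to_start")) = true
    · rw [if_pos h1]
      obtain ⟨hb1, hrest⟩ := Bool.and_eq_true_iff.mp h1
      have hb1' : pvGetStatus b = "yet_to_start" := by simpa using hb1
      simp only [List.all_map, List.all_eq_true, Function.comp, beq_iff_eq] at hrest
      simp [hb1', pvNorm]
      intro x hx
      simp [hrest x hx]
    · rw [if_neg (by simpa using h1)]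
      by_cases h2 : ((pvGetStatus b == "completed") && (bs.map pvGetStatus).all (fun s => s == "completed")) = true
      · rw [if_pos h2]
        obtain ⟨hb1, hrest⟩ := Bool.and_eq_true_iff.mp h2
        have hb1' : pvGetStatus b = "completed" := by simpa using hb1
        simp only [List.all_map, List.all_eq_true, Function.comp, beq_iff_eq] at hrest
        simp [hb1', pvNorm]
        intro x hx
        simp [hrest x hx]
      · rw [if_neg (by simpa using h2)]
        by_cases hall : (bs.map (fun x => pvNorm (pvGetStatus x))).all (fun s => s == pvNorm (pvGetStatus b)) = true
        · -- all normalized statuses equal the head's; the head cannot normalize to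
          -- "yet_to_start" or "completed" (that would contradict h1/h2), so it is "triggered"
          rw [if_pos hall]
          by_cases hy : pvNorm (pvGetStatus b) = "yet_to_start"
          · exfalso; apply h1
            have hb1 : (pvGetStatus b == "yet_to_start") = true := by
              rw [← pvNorm_eq_yts]; simp [hy]
            refine Bool.and_eq_true_iff.mpr ⟨hb1, ?_⟩
            simp only [List.all_map, List.all_eq_true] at hall ⊢
            intro x hx
            have := hall x hx
            rw [hy] at this
            rw [Function.comp, ← pvNorm_eq_yts]; exact this
          · by_cases hc : pvNorm (pvGetStatus b) = "completed"
            · exfalso; apply h2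
              have hb1 : (pvGetStatus b == "completed") = true := by
                rw [← pvNorm_eq_cpl]; simp [hc]
              refine Bool.and_eq_true_iff.mpr ⟨hb1, ?_⟩
              simp only [List.all_map, List.all_eq_true] at hall ⊢
              intro x hx
              have := hall x hx
              rw [hc] at this
              rw [Function.comp, ← pvNorm_eq_cpl]; exact this
            · have htr : pvNorm (pvGetStatus b) = "triggered" := by
                unfold pvNorm
                split
                · rfl
                · next h =>
                  simp only [Bool.and_eq_true, bne_iff_ne, ne_eq, not_and, not_not] at h
                  by_cases e1 : pvGetStatus b = "yet_to_start"
                  · exact absurd (by simp [pvNorm, e1]) hy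
                  · exact absurd (by simp [pvNorm, h e1]) hc
              simp [htr]
        · rw [if_neg hall]

-- ===== VERDICT (by name: the statement is the Claim_ definition above) =====
theorem get_ingestion_status_spec : Claim_equal_get_ingestion_status := by
  intro ingestion_id data _ _
  exact pv_core (((PySem.Dict.mk data).get? "batches").getD [])
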